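-- pv_equiv track=rewrite | github.com/annikahe/Economical-Caching-with-Predictions | Simulations/history.py | get_ends_of_chunks
-- ===== SOURCE A (Python) =====
-- def get_ends_of_chunks(index_list):
--     """
--     Returns a list of integers.
--     Every integer corresponds to the number of how many times the same number appears in index_list.
--     :param index_list: List of numbers
--     :return: List of integers
--     """
--     if len(index_list) == 0:
--         return [0]
--     ends_of_chunks = []
--     for i in range(1, len(index_list)):
--         if index_list[i] != index_list[i - 1]:
--             ends_of_chunks.append(i-1)
--
--     ends_of_chunks.append(len(index_list)-1)
--
--     return ends_of_chunks
-- ===== SOURCE B (Python) =====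
-- from itertools import groupby
--
--
-- def get_ends_of_chunks(index_list):
--     if len(index_list) == 0:
--         return [0]
--     ends = []
--     total = 0
--     for _, grp in groupby(index_list):
--         total += sum(1 for _ in grp)
--         ends.append(total - 1)
--     return ends
-- ===== Notes on version B (the rewrite author's own statement) =====
-- stated objective: idiomatic
-- what changed: Instead of comparing each adjacent index pair of the list, B walks the runs of equal values with itertools.groupby and emits cumulative run-length endpoints.
import Mathlib
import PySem

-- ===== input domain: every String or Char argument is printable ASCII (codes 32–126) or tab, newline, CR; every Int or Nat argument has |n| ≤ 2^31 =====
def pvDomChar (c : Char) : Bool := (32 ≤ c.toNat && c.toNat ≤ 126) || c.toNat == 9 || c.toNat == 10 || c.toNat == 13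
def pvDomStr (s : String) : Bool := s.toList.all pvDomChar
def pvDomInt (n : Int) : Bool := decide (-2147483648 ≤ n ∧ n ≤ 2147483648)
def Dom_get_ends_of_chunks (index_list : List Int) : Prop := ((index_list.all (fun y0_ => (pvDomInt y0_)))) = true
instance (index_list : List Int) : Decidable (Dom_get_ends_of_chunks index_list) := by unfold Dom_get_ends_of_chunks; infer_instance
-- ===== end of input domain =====

-- B replaces A's adjacent-pair index comparisons by a groupby-style walk over runs of
-- equal values, emitting cumulative run-length endpoints (objective: idiomatic).


-- ===== PORT A =====
def get_ends_of_chunks (index_list : List Int) : List Int :=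
  if index_list.length == 0 then [0]
  else
    let ends_of_chunks :=
      (PySem.List.pyRange 1 (index_list.length : Int) 1).foldl
        (fun acc i =>
          if PySem.List.pyGetD index_list i 0 ≠ PySem.List.pyGetD index_list (i - 1) 0 then
            acc ++ [i - 1]
          else acc) []
    ends_of_chunks ++ [(index_list.length : Int) - 1]

-- ===== PORT B =====
-- run lengths of groupby(index_list): pvGo carries the current group's value and count
def pvGo (x : Int) (c : Nat) : List Int → List Nat
  | [] => [c]
  | y :: ys => if y == x then pvGo x (c + 1) ys else c :: pvGo y 1 ys

def pvRunLengths : List Int → List Nat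
  | [] => []
  | x :: xs => pvGo x 1 xs

def get_ends_of_chunks_alt (index_list : List Int) : List Int :=
  if index_list.length == 0 then [0]
  else
    ((pvRunLengths index_list).foldl
      (fun (p : List Int × Int) (k : Nat) => (p.1 ++ [p.2 + (k : Int) - 1], p.2 + (k : Int))) ([], 0)).1

-- ===== PRECONDITION & SPEC =====
def Spec_get_ends_of_chunks (index_list : List Int) (out : List Int) : Prop := out = get_ends_of_chunks_alt index_list
instance (index_list : List Int) (out : List Int) : Decidable (Spec_get_ends_of_chunks index_list out) := by unfold Spec_get_ends_of_chunks; infer_instance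

-- ===== CLAIM (what is proved, stated in full; the proofs are below) =====
def Claim_equal_get_ends_of_chunks : Prop := ∀ (index_list : List Int), Dom_get_ends_of_chunks index_list → Spec_get_ends_of_chunks index_list (get_ends_of_chunks index_list)

-- ===== LEMMAS AND PROOFS =====

-- break indices of the list starting at position k: k-1+j is emitted when positions differ
def pvAdj : List Int → Int → List Int
  | x :: y :: t, k => (if y ≠ x then [k] else []) ++ pvAdj (y :: t) (k + 1)
  | _, _ => []

def pvEndsOf : List Nat → Int → List Int
  | [], _ => []
  | k :: t, total => (total + (k : Int) - 1) :: pvEndsOf t (total + (k : Int))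

theorem pvAdj_short (t : List Int) (k : Int) (h : t.length ≤ 1) : pvAdj t k = [] := by
  match t with
  | [] => rfl
  | [x] => rfl
  | x :: y :: r => simp at h

theorem pv_gen (l : List Int) (s : Nat) (hs : s < l.length) :
    (PySem.List.pyRange ((s : Int) + 1) (l.length : Int) 1).filter
        (fun i => decide (PySem.List.pyGetD l i 0 ≠ PySem.List.pyGetD l (i - 1) 0))
      = pvAdj (l.drop s) ((s : Int) + 1) := by
  by_cases h : s + 1 < l.length
  · have hcons : PySem.List.pyRange ((s : Int) + 1) (l.length : Int) 1
        = ((s : Int) + 1) :: PySem.List.pyRange ((s : Int) + 1 + 1) (l.length : Int) 1 :=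
      PySem.List.pyRange_one_cons (by exact_mod_cast h)
    have hg1 : PySem.List.pyGetD l ((s : Int) + 1) 0 = l[s + 1]'h := by
      have : ((s : Int) + 1) = ((s + 1 : Nat) : Int) := by omega
      rw [this, PySem.List.pyGetD_natCast, List.getD_eq_getElem l 0 h]
    have hg0 : PySem.List.pyGetD l ((s : Int) + 1 - 1) 0 = l[s]'hs := by
      have : ((s : Int) + 1 - 1) = ((s : Nat) : Int) := by omega
      rw [this, PySem.List.pyGetD_natCast, List.getD_eq_getElem l 0 hs]
    have hdrop : l.drop s = l[s]'hs :: l[s + 1]'h :: l.drop (s + 2) := by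
      rw [List.drop_eq_getElem_cons hs, List.drop_eq_getElem_cons h]
    have ih := pv_gen l (s + 1) h
    rw [hcons]
    simp only [List.filter_cons, hg1, hg0, hdrop]
    have hsh : ((s : Int) + 1 + 1) = (((s + 1 : Nat) : Int) + 1) := by push_cast; ring
    rw [hsh, ih, List.drop_eq_getElem_cons h]
    show _ = pvAdj (l[s]'hs :: l[s + 1]'h :: l.drop (s + 2)) ((s : Int) + 1)
    rw [pvAdj]
    by_cases hne : l[s + 1]'h ≠ l[s]'hs <;> simp [hne]
  · have hnil : PySem.List.pyRange ((s : Int) + 1) (l.length : Int) 1 = [] :=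
      PySem.List.pyRange_one_eq_nil (by omega)
    rw [hnil, pvAdj_short (l.drop s) _ (by simp; omega)]
    rfl
termination_by l.length - s

theorem pv_foldl_ends (ks : List Nat) (acc : List Int) (total : Int) :
    (ks.foldl (fun (p : List Int × Int) (k : Nat) => (p.1 ++ [p.2 + (k : Int) - 1], p.2 + (k : Int))) (acc, total)).1
      = acc ++ pvEndsOf ks total := by
  induction ks generalizing acc total with
  | nil => simp [pvEndsOf]
  | cons k t ih => simp [List.foldl_cons, ih, pvEndsOf]

theorem pv_bridge (xs : List Int) (x : Int) (c : Nat) (t : Int) :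
    (pvAdj (x :: xs) (t + (c : Int))).map (· - 1) ++ [t + (c : Int) + (xs.length : Int) - 1]
      = pvEndsOf (pvGo x c xs) t := by
  induction xs generalizing x c t with
  | nil => simp [pvAdj, pvGo, pvEndsOf]
  | cons y ys ih =>
    rw [pvGo]
    by_cases hyx : y = x
    · subst hyx
      simp only [beq_self_eq_true, if_true]
      rw [pvAdj, if_neg (by simp), List.nil_append]
      have h2 : t + (c : Int) + 1 = t + ((c + 1 : Nat) : Int) := by push_cast; ring
      have h3 : t + (c : Int) + (((y :: ys).length : Nat) : Int) - 1
          = t + ((c + 1 : Nat) : Int) + ((ys.length : Nat) : Int) - 1 := by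
        simp only [List.length_cons]; push_cast; ring
      rw [h2, h3, ih]
    · rw [if_neg (by simp [hyx])]
      rw [pvAdj, if_pos hyx, pvEndsOf, ← ih y 1 (t + (c : Int))]
      simp only [Nat.cast_one, List.map_cons, List.cons_append,
        List.length_cons, List.nil_append]
      congr 3
      push_cast; ring

-- ===== VERDICT (by name: the statement is the Claim_ definition above) =====
theorem get_ends_of_chunks_spec : Claim_equal_get_ends_of_chunks := by
  intro l _
  unfold Spec_get_ends_of_chunks get_ends_of_chunks get_ends_of_chunks_alt
  match l with
  | [] => rfl
  | x :: xs =>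
    rw [if_neg (by simp), if_neg (by simp)]
    rw [PySem.List.foldl_append_ite
        (fun i => PySem.List.pyGetD (x :: xs) i 0 ≠ PySem.List.pyGetD (x :: xs) (i - 1) 0)
        (fun i => i - 1)]
    have hgen := pv_gen (x :: xs) 0 (by simp)
    simp only [Nat.cast_zero, zero_add, List.drop_zero] at hgen
    rw [hgen]
    rw [show pvRunLengths (x :: xs) = pvGo x 1 xs from rfl, pv_foldl_ends]
    rw [← pv_bridge xs x 1 0]
    simp only [Nat.cast_one, zero_add, List.nil_append, List.length_cons]
    congr 2
    push_cast; ring
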